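-- pv_equiv track=rewrite | github.com/nathanrobertbaldwin/leetcode | practice/12-24-2023-cyclic-shifts.py | cyclic_shifts
-- ===== SOURCE A (Python) =====
-- def cyclic_shifts(n, k):
--     max_idxs = []
--     n = n[-1] + n[0 : len(n) - 1]
--     max_num = n
--
--     for shift_count in range(0, len(n)):
--         n = n[1 : len(n)] + n[0]
--
--         if n > max_num:
--             max_num = n
--             max_idxs = [shift_count]
--
--         elif n == max_num:
--             max_idxs.append(shift_count)
--
--     full_loops = (k - 1) // len(max_idxs)
--     full_loop_shifts = full_loops * len(n)
--     count_maxs = full_loops * len(max_idxs)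
--
--     maxs_remaining = k - count_maxs
--     total_shifts = full_loop_shifts + max_idxs[maxs_remaining - 1]
--
--     return total_shifts
-- ===== SOURCE B (Python) =====
-- def cyclic_shifts(n, k):
--     L = len(n)
--     d = n + n
--     cand = list(range(L))
--     for t in range(L):
--         best = max(d[i + t] for i in cand)
--         cand = [i for i in cand if d[i + t] == best]
--     q, r = divmod(k - 1, len(cand))
--     return q * L + cand[r]
-- ===== Notes on version B (the rewrite author's own statement) =====
-- stated objective: alternative
-- what changed: A materializes all L rotations one mutation at a time and compares whole L-character strings against a running maximum; B never builds a rotation: it refines a candidate set of start indices column by column (MSD radix style), each round keeping only candidates whose character in the current column is maximal, which leaves exactly the maximal-rotation indices, then one divmod.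
import Mathlib
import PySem

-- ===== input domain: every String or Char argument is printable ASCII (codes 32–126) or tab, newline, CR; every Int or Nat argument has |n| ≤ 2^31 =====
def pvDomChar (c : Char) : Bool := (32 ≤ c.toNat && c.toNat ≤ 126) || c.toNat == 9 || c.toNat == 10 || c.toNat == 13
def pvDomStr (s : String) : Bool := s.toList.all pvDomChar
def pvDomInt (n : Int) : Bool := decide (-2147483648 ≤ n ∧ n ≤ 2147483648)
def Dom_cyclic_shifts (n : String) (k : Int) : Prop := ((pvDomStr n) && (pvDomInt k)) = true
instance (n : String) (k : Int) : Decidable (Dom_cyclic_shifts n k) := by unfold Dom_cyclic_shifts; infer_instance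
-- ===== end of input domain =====

-- B replaces A's mutate-and-compare loop over whole rotations by a column-wise (MSD radix style)
-- refinement of a candidate set of start indices, never materializing a rotation (objective:
-- alternative; same exact result).

-- ===== PORT A =====
-- one loop iteration of A: n = n[1:len(n)] + n[0]; update running max / equal-max index list
def pvStepA (st : List Char × List Char × List Int) (t : Int) :
    List Char × List Char × List Int :=
  let cur := PySem.List.slice st.1 (some 1) (some (PySem.List.len st.1)) ++
      [PySem.List.pyGetD st.1 0 ' ']
  if st.2.1 < cur then (cur, cur, [t])
  else if cur = st.2.1 then (cur, st.2.1, st.2.2 ++ [t])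
  else (cur, st.2.1, st.2.2)

def cyclic_shifts (n : String) (k : Int) : Int :=
  let s0 := n.toList
  let s1 := [PySem.List.pyGetD s0 (-1) ' '] ++
      PySem.List.slice s0 (some 0) (some (PySem.List.len s0 - 1))
  let res := (PySem.List.pyRange 0 (PySem.List.len s1) 1).foldl pvStepA (s1, s1, ([] : List Int))
  let full_loops := PySem.Int.floordiv (k - 1) (PySem.List.len res.2.2)
  let full_loop_shifts := full_loops * PySem.List.len res.1
  let count_maxs := full_loops * PySem.List.len res.2.2
  let maxs_remaining := k - count_maxs
  full_loop_shifts + PySem.List.pyGetD res.2.2 (maxs_remaining - 1) 0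

-- ===== PORT B =====
-- one round of Source B's loop body: best = max(d[i+t] for i in cand); cand = [i for i in cand if d[i+t] == best]
-- (d[i+t] is always in range when this runs, so the total pyGetD with a dummy default is exact)
def pvRoundB (d : List Char) (cand : List Int) (t : Int) : List Int :=
  let best := (PySem.List.max? (cand.map (fun i => PySem.List.pyGetD d (i + t) ' '))
      (fun c => c)).getD ' '
  cand.filter (fun i => PySem.List.pyGetD d (i + t) ' ' == best)

def cyclic_shifts_alt (n : String) (k : Int) : Int :=
  let s := n.toList
  let L := PySem.List.len s
  let d := s ++ s
  let cand := (PySem.List.pyRange 0 L 1).foldl (pvRoundB d) (PySem.List.pyRange 0 L 1)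
  let q := PySem.Int.floordiv (k - 1) (PySem.List.len cand)
  let r := PySem.Int.mod (k - 1) (PySem.List.len cand)
  q * L + PySem.List.pyGetD cand r 0

-- ===== PRECONDITION & SPEC =====
-- A evaluates n[-1] first, an IndexError on the empty string (B's max()/divmod would raise there
-- too), so Pre_ excludes exactly the empty string.
def Pre_cyclic_shifts (n : String) (k : Int) : Prop := n ≠ ""
instance (n : String) (k : Int) : Decidable (Pre_cyclic_shifts n k) := by
  unfold Pre_cyclic_shifts; infer_instance

def pvWitness_cyclic_shifts : String × Int := ("ab", 1)

def Spec_cyclic_shifts (n : String) (k : Int) (out : Int) : Prop := out = cyclic_shifts_alt n k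
instance (n : String) (k : Int) (out : Int) : Decidable (Spec_cyclic_shifts n k out) := by
  unfold Spec_cyclic_shifts; infer_instance

-- ===== CLAIM (what is proved, stated in full; the proofs are below) =====
def Claim_equal_cyclic_shifts : Prop := ∀ (n : String) (k : Int),
  Dom_cyclic_shifts n k → Pre_cyclic_shifts n k → Spec_cyclic_shifts n k (cyclic_shifts n k)

-- ===== LEMMAS AND PROOFS =====

def pvRot (s : List Char) (t : Nat) : List Char := s.drop t ++ s.take t

theorem pvRot_length (s : List Char) (t : Nat) : (pvRot s t).length = s.length := by
  simp [pvRot]; omega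

theorem pvRot_doubled (s : List Char) (t : Nat) (ht : t ≤ s.length) :
    (((s ++ s).drop t).take s.length) = pvRot s t := by
  rw [List.drop_append, List.take_append]
  have h1 : t - s.length = 0 := by omega
  have h2 : s.length - (s.drop t).length = t := by simp; omega
  rw [h1, h2, List.take_of_length_le (by simp)]
  rfl

theorem pvRot_succ_mod (s : List Char) (t : Nat) (ht : t < s.length) :
    pvRot s (t + 1) = pvRot s ((t + 1) % s.length) := by
  rcases Nat.lt_or_ge (t+1) s.length with h | h
  · rw [Nat.mod_eq_of_lt h]
  · have h1 : t + 1 = s.length := by omega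
    rw [h1, Nat.mod_self]
    simp [pvRot]

theorem pvStep_cur (s : List Char) (t : Nat) (ht : t < s.length) :
    PySem.List.slice (pvRot s t) (some 1) (some (PySem.List.len (pvRot s t))) ++
      [PySem.List.pyGetD (pvRot s t) 0 ' '] = pvRot s ((t + 1) % s.length) := by
  have hr : pvRot s t = s[t] :: (s.drop (t+1) ++ s.take t) := by
    unfold pvRot; rw [List.drop_eq_getElem_cons ht]; rfl
  rw [← pvRot_succ_mod s t ht]
  rw [PySem.List.slice_toNat _ (by omega) (by simp [PySem.List.len])]
  rw [hr]
  simp only [PySem.List.pyGetD_zero_cons]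
  have hlen2 : (s.drop (t+1) ++ s.take t).length = s.length - 1 := by simp; omega
  have hd : List.drop (Int.toNat 1) (s[t] :: (s.drop (t+1) ++ s.take t)) =
      s.drop (t+1) ++ s.take t := by rfl
  rw [hd, List.take_of_length_le (by simp [PySem.List.len, hlen2])]
  have h3 : pvRot s (t+1) = s.drop (t+1) ++ (s.take t ++ [s[t]]) := by
    unfold pvRot
    rw [List.take_append_getElem ht]
  rw [h3, List.append_assoc]

def pvMaxA (s : List Char) (j : Nat) : List Char :=
  ((List.range j).map (pvRot s)).foldl max (pvRot s (s.length - 1))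

def pvIdxA (s : List Char) (j : Nat) : List Int :=
  ((List.range j).filter (fun t => pvRot s t = pvMaxA s j)).map (fun t : Nat => (t : Int))

theorem pvMaxA_succ (s : List Char) (j : Nat) :
    pvMaxA s (j + 1) = max (pvMaxA s j) (pvRot s j) := by
  unfold pvMaxA
  rw [List.range_succ, List.map_append, List.foldl_append]
  simp

theorem pvLoopA (s : List Char) (hs : s ≠ []) : ∀ j, j ≤ s.length →
    ((List.map (fun t : Nat => (t : Int)) (List.range j)).foldl pvStepA
        (pvRot s (s.length - 1), pvRot s (s.length - 1), ([] : List Int)) =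
      (pvRot s ((s.length - 1 + j) % s.length), pvMaxA s j, pvIdxA s j))
    ∧ (∀ t, t < j → pvRot s t ≤ pvMaxA s j)
    ∧ pvRot s (s.length - 1) ≤ pvMaxA s j
    ∧ (pvMaxA s j = pvRot s (s.length - 1) ∨ ∃ t, t < j ∧ pvMaxA s j = pvRot s t) := by
  have hL : 0 < s.length := List.length_pos_of_ne_nil hs
  intro j
  induction j with
  | zero =>
    intro _
    refine ⟨?_, by omega, le_refl _, Or.inl rfl⟩
    simp [pvMaxA, pvIdxA, Nat.mod_eq_of_lt (by omega : s.length - 1 < s.length)]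
  | succ j ih =>
    intro hj1
    obtain ⟨hfold, hub, hlast, _⟩ := ih (by omega)
    have hjL : j < s.length := by omega
    rw [List.range_succ, List.map_append, List.foldl_append, hfold]
    simp only [List.map_cons, List.map_nil, List.foldl_cons, List.foldl_nil]
    set tc := (s.length - 1 + j) % s.length with htc
    have htcL : tc < s.length := Nat.mod_lt _ (by omega)
    have hcurj : (tc + 1) % s.length = j := by
      rw [htc, Nat.mod_add_mod, show s.length - 1 + j + 1 = s.length + j by omega,
        Nat.add_mod_left, Nat.mod_eq_of_lt hjL]
    have hstep : PySem.List.slice (pvRot s tc) (some 1)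
          (some (PySem.List.len (pvRot s tc))) ++
        [PySem.List.pyGetD (pvRot s tc) 0 ' '] = pvRot s j := by
      rw [pvStep_cur s tc htcL, hcurj]
    have hnext : (s.length - 1 + (j + 1)) % s.length = j := by
      rw [show s.length - 1 + (j + 1) = s.length + j by omega,
        Nat.add_mod_left, Nat.mod_eq_of_lt hjL]
    unfold pvStepA
    simp only [hstep, hnext]
    rcases lt_trichotomy (pvMaxA s j) (pvRot s j) with hlt | heq | hgt
    · have hM1 : pvMaxA s (j + 1) = pvRot s j := by
        rw [pvMaxA_succ, max_eq_right hlt.le]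
      rw [if_pos hlt]
      refine ⟨?_, ?_, ?_, Or.inr ⟨j, by omega, hM1⟩⟩
      · rw [hM1]
        have hI : pvIdxA s (j + 1) = [(j : Int)] := by
          unfold pvIdxA
          rw [hM1, List.range_succ, List.filter_append]
          have hnil : (List.range j).filter (fun t => decide (pvRot s t = pvRot s j)) = [] := by
            rw [List.filter_eq_nil_iff]
            intro t htm
            have := hub t (List.mem_range.mp htm)
            simp only [decide_eq_true_eq]
            exact fun hc => absurd (hc ▸ this) (not_le_of_gt hlt)
          rw [hnil]
          simp
        rw [hI]
      · intro t htj
        rw [hM1]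
        rcases Nat.lt_or_ge t j with h | h
        · exact le_of_lt (lt_of_le_of_lt (hub t h) hlt)
        · have : t = j := by omega
          rw [this]
      · rw [hM1]; exact le_of_lt (lt_of_le_of_lt hlast hlt)
    · have hM1 : pvMaxA s (j + 1) = pvMaxA s j := by
        rw [pvMaxA_succ, ← heq, max_self]
      rw [if_neg (by rw [heq]; exact lt_irrefl _), if_pos heq.symm]
      refine ⟨?_, ?_, hM1 ▸ hlast, Or.inr ⟨j, by omega, hM1.trans heq⟩⟩
      · rw [hM1]
        have hI : pvIdxA s (j + 1) = pvIdxA s j ++ [(j : Int)] := by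
          unfold pvIdxA
          rw [hM1, List.range_succ, List.filter_append, List.map_append]
          congr 1
          simp [heq.symm]
        rw [hI]
      · intro t htj
        rw [hM1]
        rcases Nat.lt_or_ge t j with h | h
        · exact hub t h
        · have : t = j := by omega
          rw [this, heq]
    · have hM1 : pvMaxA s (j + 1) = pvMaxA s j := by
        rw [pvMaxA_succ, max_eq_left hgt.le]
      rw [if_neg (not_lt_of_gt hgt), if_neg (ne_of_lt hgt)]
      refine ⟨?_, ?_, hM1 ▸ hlast, ?_⟩
      · rw [hM1]
        have hI : pvIdxA s (j + 1) = pvIdxA s j := by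
          unfold pvIdxA
          rw [hM1, List.range_succ, List.filter_append]
          have : [j].filter (fun t => decide (pvRot s t = pvMaxA s j)) = [] := by
            simp [ne_of_lt hgt]
          rw [this, List.append_nil]
        rw [hI]
      · intro t htj
        rw [hM1]
        rcases Nat.lt_or_ge t j with h | h
        · exact hub t h
        · have : t = j := by omega
          rw [this]; exact hgt.le
      · rcases ih (by omega) with ⟨_, _, _, hmem⟩
        rcases hmem with h | ⟨t, htj, hMe⟩
        · exact Or.inl (hM1 ▸ h)
        · exact Or.inr ⟨t, by omega, hM1 ▸ hMe⟩

theorem pvRange_cast (L : Nat) :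
    PySem.List.pyRange 0 (L : Int) 1 = List.map (fun t : Nat => (t : Int)) (List.range L) := by
  rw [PySem.List.pyRange_one]
  simp

theorem pvDropLast_rot (s : List Char) (hs : s ≠ []) :
    s.drop (s.length - 1) = [s.getLast hs] := by
  conv_lhs => rw [← List.dropLast_concat_getLast hs]
  rw [List.drop_left' (by simp [List.length_dropLast])]

-- ===== B-side lemmas: lexicographic facts =====

theorem pvLexConsLt (a : Char) (u v : List Char) : (a :: u) < (a :: v) ↔ u < v := by
  rw [List.cons_lt_cons_iff]
  simp

theorem pvLexAppendLt (w u v : List Char) : (w ++ u) < (w ++ v) ↔ u < v := by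
  induction w with
  | nil => rfl
  | cons a w ih => simpa [pvLexConsLt] using ih

theorem pvLexAppendLe (w u v : List Char) : (w ++ u) ≤ (w ++ v) ↔ u ≤ v := by
  rw [← not_lt, ← not_lt, pvLexAppendLt]

theorem pvLexSingletonLt (a b : Char) : ([a] : List Char) < [b] ↔ a < b := by
  rw [List.cons_lt_cons_iff]
  constructor
  · rintro (h | ⟨_, h2⟩)
    · exact h
    · exact absurd h2 (lt_irrefl _)
  · exact Or.inl

theorem pvLexSingletonLe (a b : Char) : ([a] : List Char) ≤ [b] ↔ a ≤ b := by
  rw [← not_lt, ← not_lt, pvLexSingletonLt]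

theorem pvLexTakeLt (t : Nat) : ∀ (u v : List Char), u.length = v.length →
    u.take t < v.take t → u < v := by
  induction t with
  | zero => intro u v _ h; simp at h
  | succ t ih =>
    intro u v hlen h
    cases u with
    | nil =>
      cases v with
      | nil => simp at h
      | cons b v => simp at hlen
    | cons a u =>
      cases v with
      | nil => simp at hlen
      | cons b v =>
        simp only [List.take_succ_cons] at h
        rcases List.cons_lt_cons_iff.mp h with h2 | ⟨rfl, h2⟩
        · exact List.cons_lt_cons_iff.mpr (Or.inl h2)
        · exact List.cons_lt_cons_iff.mpr (Or.inr ⟨rfl, ih u v (by simpa using hlen) h2⟩)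

theorem pvLexTakeLe (t : Nat) (u v : List Char) (hlen : u.length = v.length)
    (h : u ≤ v) : u.take t ≤ v.take t := by
  by_contra hc
  exact absurd (pvLexTakeLt t v u hlen.symm (lt_of_not_ge hc)) (not_lt_of_ge h)

theorem pvLexExtLt : ∀ (u v a b : List Char), u.length = v.length → u < v →
    u ++ a < v ++ b := by
  intro u
  induction u with
  | nil =>
    intro v a b hlen h
    cases v with
    | nil => exact absurd h (lt_irrefl _)
    | cons x v => simp at hlen
  | cons x u ih =>
    intro v a b hlen h
    cases v with
    | nil => simp at hlen
    | cons y v =>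
      rcases List.cons_lt_cons_iff.mp h with h2 | ⟨rfl, h2⟩
      · exact List.cons_lt_cons_iff.mpr (Or.inl h2)
      · exact List.cons_lt_cons_iff.mpr (Or.inr ⟨rfl, ih v a b (by simpa using hlen) h2⟩)

-- ===== B-side lemmas: the candidate-refinement invariant =====

-- character of rotation i at column t
def pvChr (s : List Char) (i t : Nat) : Char := (pvRot s i).getD t ' '

-- candidate set after t rounds: exactly the indices whose t-prefix of the rotation is maximal
def pvCandN (s : List Char) (t : Nat) : List Nat :=
  (List.range s.length).filter
    (fun i => (List.range s.length).all
      (fun j => decide ((pvRot s j).take t ≤ (pvRot s i).take t)))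

theorem pvCandN_mem (s : List Char) (t i : Nat) :
    i ∈ pvCandN s t ↔ i < s.length ∧ ∀ j, j < s.length →
      (pvRot s j).take t ≤ (pvRot s i).take t := by
  simp [pvCandN, List.mem_filter, List.all_eq_true]

theorem pvCandN_zero (s : List Char) : pvCandN s 0 = List.range s.length := by
  unfold pvCandN
  apply List.filter_eq_self.mpr
  intro i _
  simp

theorem pvCandN_ne_nil (s : List Char) (hs : s ≠ []) (t : Nat) : pvCandN s t ≠ [] := by
  have hL : 0 < s.length := List.length_pos_of_ne_nil hs
  obtain ⟨i, hi, hmax⟩ := Finset.exists_max_image (Finset.range s.length)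
    (fun j => (pvRot s j).take t) ⟨0, Finset.mem_range.mpr hL⟩
  intro hnil
  have : i ∈ pvCandN s t := (pvCandN_mem s t i).mpr
    ⟨Finset.mem_range.mp hi, fun j hj => hmax j (Finset.mem_range.mpr hj)⟩
  rw [hnil] at this
  exact absurd this (List.not_mem_nil)

theorem pvPre_succ (s : List Char) (i t : Nat) (ht : t < s.length) :
    (pvRot s i).take (t + 1) = (pvRot s i).take t ++ [pvChr s i t] := by
  rw [List.take_add_one]
  congr 1
  have h : t < (pvRot s i).length := by rw [pvRot_length]; exact ht
  rw [List.getElem?_eq_getElem h]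
  unfold pvChr
  rw [List.getD_eq_getElem _ _ h]
  rfl

theorem pvPre_len (s : List Char) (i t : Nat) (ht : t ≤ s.length) :
    ((pvRot s i).take t).length = t := by
  rw [List.length_take, pvRot_length]
  omega

-- a char bridge: d[i+t] over the doubled list is the rotation's column-t character
theorem pvChr_doubled (s : List Char) (i t : Nat) (hi : i < s.length) (ht : t < s.length) :
    PySem.List.pyGetD (s ++ s) ((i : Int) + (t : Int)) ' ' = pvChr s i t := by
  have hcast : (i : Int) + (t : Int) = ((i + t : Nat) : Int) := by push_cast; ring
  rw [hcast, PySem.List.pyGetD_natCast]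
  unfold pvChr
  have hrd : pvRot s i = ((s ++ s).drop i).take s.length :=
    (pvRot_doubled s i hi.le).symm
  rw [hrd]
  have h1 : i + t < (s ++ s).length := by simp; omega
  rw [List.getD_eq_getElem _ _ h1]
  have h2 : t < (((s ++ s).drop i).take s.length).length := by
    rw [List.length_take, List.length_drop]; simp; omega
  rw [List.getD_eq_getElem _ _ h2]
  simp

-- all members of the candidate set share the same prefix
theorem pvCandN_same_pre (s : List Char) (t i i' : Nat)
    (hi : i ∈ pvCandN s t) (hi' : i' ∈ pvCandN s t) :
    (pvRot s i).take t = (pvRot s i').take t := by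
  obtain ⟨hiL, hiM⟩ := (pvCandN_mem s t i).mp hi
  obtain ⟨hi'L, hi'M⟩ := (pvCandN_mem s t i').mp hi'
  exact le_antisymm (hi'M i hiL) (hiM i' hi'L)

-- one refinement round is exact: keeping the max-column candidates gives the (t+1)-prefix argmaxes
theorem pvRound_step (s : List Char) (hs : s ≠ []) (t : Nat) (ht : t < s.length) :
    pvRoundB (s ++ s) ((pvCandN s t).map (fun i : Nat => (i : Int))) (t : Int) =
      (pvCandN s (t + 1)).map (fun i : Nat => (i : Int)) := by
  have hL : 0 < s.length := List.length_pos_of_ne_nil hs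
  -- the mapped char list
  have hchars : ((pvCandN s t).map (fun i : Nat => (i : Int))).map
      (fun i => PySem.List.pyGetD (s ++ s) (i + (t : Int)) ' ') =
      (pvCandN s t).map (fun i => pvChr s i t) := by
    rw [List.map_map]
    apply List.map_congr_left
    intro i hi
    have hiL := ((pvCandN_mem s t i).mp hi).1
    exact pvChr_doubled s i t hiL ht
  obtain ⟨c0, C', hC⟩ : ∃ c0 C', (pvCandN s t).map (fun i => pvChr s i t) = c0 :: C' := by
    cases hc : (pvCandN s t).map (fun i => pvChr s i t) with
    | nil =>
      exact absurd (List.map_eq_nil_iff.mp hc) (pvCandN_ne_nil s hs t)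
    | cons a l => exact ⟨a, l, rfl⟩
  obtain ⟨m, hm⟩ : ∃ m, PySem.List.max? ((pvCandN s t).map (fun i => pvChr s i t))
      (fun c => c) = some m := by
    cases hmx : PySem.List.max? ((pvCandN s t).map (fun i => pvChr s i t)) (fun c => c) with
    | none =>
      exfalso
      have := (PySem.List.max?_eq_none_iff _ _).mp hmx
      rw [hC] at this
      exact List.cons_ne_nil c0 C' this
    | some m => exact ⟨m, rfl⟩
  have hmmem : m ∈ (pvCandN s t).map (fun i => pvChr s i t) := PySem.List.max?_mem hm
  have hmub : ∀ i ∈ pvCandN s t, pvChr s i t ≤ m := by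
    intro i hi
    exact PySem.List.max?_isMax hm _ (List.mem_map_of_mem hi)
  obtain ⟨i0, hi0mem, hi0chr⟩ := List.mem_map.mp hmmem
  -- now unfold pvRoundB
  unfold pvRoundB
  rw [hchars, hm]
  simp only [Option.getD_some, List.filter_map]
  congr 1
  -- both sides are filters of range L; compare pointwise
  unfold pvCandN
  rw [List.filter_filter]
  apply List.filter_congr
  intro i hiR
  have hiL : i < s.length := List.mem_range.mp hiR
  rw [Bool.eq_iff_iff]
  simp only [Function.comp_apply, List.all_eq_true, List.mem_range, Bool.and_eq_true,
    decide_eq_true_eq, beq_iff_eq]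
  constructor
  · -- char matches max and i was a t-prefix argmax → i is a (t+1)-prefix argmax
    rintro ⟨hchr, hpre⟩
    have hCmem : i ∈ pvCandN s t := (pvCandN_mem s t i).mpr ⟨hiL, hpre⟩
    intro j hj
    rw [pvPre_succ s j t ht, pvPre_succ s i t ht]
    rcases lt_or_eq_of_le (hpre j hj) with hlt | heq
    · exact le_of_lt (pvLexExtLt _ _ _ _
        (by rw [pvPre_len s j t (by omega), pvPre_len s i t (by omega)]) hlt)
    · have hjC : j ∈ pvCandN s t := by
        rw [pvCandN_mem]
        refine ⟨hj, fun j' hj' => heq ▸ hpre j' hj'⟩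
      have hchr' : pvChr s i t = m := by
        rw [← pvChr_doubled s i t hiL ht]; exact hchr
      rw [heq, pvLexAppendLe, pvLexSingletonLe, hchr']
      exact hmub j hjC
  · -- i is a (t+1)-prefix argmax → char matches max and i was a t-prefix argmax
    intro H
    have hCmem : i ∈ pvCandN s t := by
      rw [pvCandN_mem]
      refine ⟨hiL, fun j hj => ?_⟩
      have := H j hj
      have htk := pvLexTakeLe t _ _ (by rw [pvPre_len s j (t+1) (by omega),
        pvPre_len s i (t+1) (by omega)]) this
      simpa [List.take_take] using htk
    have hsame : (pvRot s i0).take t = (pvRot s i).take t :=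
      pvCandN_same_pre s t i0 i hi0mem hCmem
    have h1 := H i0 ((pvCandN_mem s t i0).mp hi0mem).1
    rw [pvPre_succ s i0 t ht, pvPre_succ s i t ht, hsame, pvLexAppendLe,
      pvLexSingletonLe] at h1
    have h2 : pvChr s i t = m := le_antisymm (hmub i hCmem) (hi0chr ▸ h1)
    refine ⟨by rw [pvChr_doubled s i t hiL ht]; exact h2, fun j hj => ?_⟩
    exact ((pvCandN_mem s t i).mp hCmem).2 j hj

-- loop invariant over the rounds

theorem pvLoopB (s : List Char) (hs : s ≠ []) : ∀ t, t ≤ s.length →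
    (List.map (fun u : Nat => (u : Int)) (List.range t)).foldl (pvRoundB (s ++ s))
        ((List.range s.length).map (fun i : Nat => (i : Int))) =
      (pvCandN s t).map (fun i : Nat => (i : Int)) := by
  intro t
  induction t with
  | zero =>
    intro _
    simp [pvCandN_zero]
  | succ t ih =>
    intro ht
    rw [List.range_succ, List.map_append, List.foldl_append, ih (by omega)]
    simp only [List.map_cons, List.map_nil, List.foldl_cons, List.foldl_nil]
    exact pvRound_step s hs t (by omega)

-- the final candidate set is exactly A's equal-max index list
theorem pvCandN_final (s : List Char) (hs : s ≠ []) :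
    (pvCandN s s.length).map (fun i : Nat => (i : Int)) = pvIdxA s s.length := by
  obtain ⟨_, hub, hlast, hmem⟩ := pvLoopA s hs s.length (le_refl _)
  have hL : 0 < s.length := List.length_pos_of_ne_nil hs
  have htake : ∀ i, (pvRot s i).take s.length = pvRot s i := by
    intro i
    exact List.take_of_length_le (by rw [pvRot_length])
  unfold pvIdxA pvCandN
  congr 1
  apply List.filter_congr
  intro i hiR
  have hiL : i < s.length := List.mem_range.mp hiR
  rw [Bool.eq_iff_iff]
  simp only [List.all_eq_true, List.mem_range, decide_eq_true_eq, htake]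
  constructor
  · intro H
    apply le_antisymm
    · exact hub i hiL
    · rcases hmem with h | ⟨t', ht', h⟩
      · rw [h]; exact H _ (by omega)
      · rw [h]; exact H _ ht' 
  · intro H j hj
    rw [H]
    exact hub j hj

theorem pvMain (n : String) (k : Int) (hpre : n ≠ "") :
    cyclic_shifts n k = cyclic_shifts_alt n k := by
  have hs : n.toList ≠ [] := fun h => hpre (String.toList_eq_nil_iff.mp h)
  set s := n.toList with hsdef
  have hL : 0 < s.length := List.length_pos_of_ne_nil hs
  have hsl : PySem.List.len s = (s.length : Int) := by simp [PySem.List.len_eq]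
  have hs1 : [PySem.List.pyGetD s (-1) ' '] ++
      PySem.List.slice s (some 0) (some (PySem.List.len s - 1)) =
      pvRot s (s.length - 1) := by
    rw [PySem.List.pyGetD_neg_one s ' ' hs, hsl,
      show (s.length : Int) - 1 = ((s.length - 1 : Nat) : Int) by omega]
    simp only [PySem.List.slice_zero_start, PySem.List.slice_to_natCast]
    unfold pvRot
    rw [pvDropLast_rot s hs]
  have hlen1 : PySem.List.len (pvRot s (s.length - 1)) = (s.length : Int) := by
    simp [PySem.List.len_eq, pvRot_length]
  obtain ⟨hfold, _, _, _⟩ := pvLoopA s hs s.length (le_refl _)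
  have hlenc : PySem.List.len (pvRot s ((s.length - 1 + s.length) % s.length)) =
      (s.length : Int) := by
    simp [PySem.List.len_eq, pvRot_length]
  unfold cyclic_shifts cyclic_shifts_alt
  simp only []
  rw [← hsdef]
  rw [hs1, hlen1, hsl, pvRange_cast, hfold]
  dsimp only
  rw [hlenc]
  rw [pvLoopB s hs s.length (le_refl _), pvCandN_final s hs]
  have harith : k - PySem.Int.floordiv (k - 1) (PySem.List.len (pvIdxA s s.length)) *
      PySem.List.len (pvIdxA s s.length) - 1 =
      PySem.Int.mod (k - 1) (PySem.List.len (pvIdxA s s.length)) := by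
    have h := PySem.Int.floordiv_mul_add_mod (k - 1) (PySem.List.len (pvIdxA s s.length))
    linarith
  rw [harith]

-- ===== VERDICT (by name: the statement is the Claim_ definition above) =====
theorem cyclic_shifts_spec : Claim_equal_cyclic_shifts := by
  intro n k _ hpre
  unfold Spec_cyclic_shifts
  exact pvMain n k hpre
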